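-- pv_equiv track=rewrite | github.com/MartinSavc/SpatialConfNetExt | tensorflowlib/unetkeras.py | calc_unet_cropping_size
-- ===== SOURCE A (Python) =====
-- def calc_unet_cropping_size(
--         size,
--         n_layers,
--         filter_size,
--         pool_size,
--         ):
--     size_cropped = size
--     # down
--     for l in range(n_layers-1):
--         size_cropped -= 2*(filter_size-1)
--         size_cropped //= 2
--     # middle
--     size_cropped -= 2*(filter_size-1)
--     # up
--     for l in range(n_layers-1):
--         size_cropped *= 2
--         size_cropped -= 2*(filter_size-1)
--
--     start = (size-size_cropped)//2
--     end = size-(start+size_cropped)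
--
--     return start, end
-- ===== SOURCE B (Python) =====
-- def calc_unet_cropping_size(size, n_layers, filter_size, pool_size):
--     # closed form: k down-steps s -> (s-c)//2 compose to (s - c*(2^k-1)) // 2^k,
--     # and k up-steps t -> 2*t - c compose to 2^k*t - c*(2^k - 1)
--     c = 2 * (filter_size - 1)
--     k = max(n_layers - 1, 0)
--     p = 2 ** k
--     size_cropped = p * ((size - c * (p - 1)) // p) - c * (2 * p - 1)
--     start = (size - size_cropped) // 2
--     end = size - (start + size_cropped)
--     return start, end
-- ===== Notes on version B (the rewrite author's own statement) =====
-- stated objective: faster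
-- what changed: Replaces A's two O(n_layers) down/up loops by the closed form of their composition: the k floor-halving steps collapse to one division by 2^k and the k doubling steps to one multiplication, so the cropped size is computed in O(1) arithmetic operations.
import Mathlib
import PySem

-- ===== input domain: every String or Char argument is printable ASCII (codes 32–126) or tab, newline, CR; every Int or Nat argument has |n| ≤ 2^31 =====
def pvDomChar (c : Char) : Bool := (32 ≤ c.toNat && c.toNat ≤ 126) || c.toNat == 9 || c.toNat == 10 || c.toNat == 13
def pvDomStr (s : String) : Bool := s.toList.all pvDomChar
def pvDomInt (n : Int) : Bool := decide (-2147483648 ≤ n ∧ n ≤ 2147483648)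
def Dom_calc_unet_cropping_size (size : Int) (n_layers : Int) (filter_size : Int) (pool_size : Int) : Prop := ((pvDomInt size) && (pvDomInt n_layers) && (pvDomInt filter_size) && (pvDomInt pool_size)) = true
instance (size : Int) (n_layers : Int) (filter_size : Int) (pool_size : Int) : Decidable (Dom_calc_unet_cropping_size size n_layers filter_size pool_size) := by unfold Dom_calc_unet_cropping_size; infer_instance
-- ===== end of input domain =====

-- B replaces A's two down/up loops by the closed form of their composition (O(1) arithmetic steps instead of O(n_layers) iterations).

-- ===== PORT A =====
def calc_unet_cropping_size (size : Int) (n_layers : Int) (filter_size : Int) (pool_size : Int) : Int × Int :=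
  let sc0 := size
  -- down
  let sc1 := (PySem.List.pyRange 0 (n_layers - 1) 1).foldl
    (fun s _ => PySem.Int.floordiv (s - 2 * (filter_size - 1)) 2) sc0
  -- middle
  let sc2 := sc1 - 2 * (filter_size - 1)
  -- up
  let sc3 := (PySem.List.pyRange 0 (n_layers - 1) 1).foldl
    (fun s _ => s * 2 - 2 * (filter_size - 1)) sc2
  let start := PySem.Int.floordiv (size - sc3) 2
  let «end» := size - (start + sc3)
  (start, «end»)

-- ===== PORT B =====
def calc_unet_cropping_size_alt (size : Int) (n_layers : Int) (filter_size : Int) (pool_size : Int) : Int × Int :=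
  let c := 2 * (filter_size - 1)
  let k := (max (n_layers - 1) 0).toNat
  let p : Int := 2 ^ k
  let size_cropped := p * PySem.Int.floordiv (size - c * (p - 1)) p - c * (2 * p - 1)
  let start := PySem.Int.floordiv (size - size_cropped) 2
  let «end» := size - (start + size_cropped)
  (start, «end»)

-- ===== PRECONDITION & SPEC =====
def Spec_calc_unet_cropping_size (size : Int) (n_layers : Int) (filter_size : Int) (pool_size : Int) (out : Int × Int) : Prop := out = calc_unet_cropping_size_alt size n_layers filter_size pool_size
instance (size : Int) (n_layers : Int) (filter_size : Int) (pool_size : Int) (out : Int × Int) : Decidable (Spec_calc_unet_cropping_size size n_layers filter_size pool_size out) := by unfold Spec_calc_unet_cropping_size; infer_instance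

-- ===== CLAIM (what is proved, stated in full; the proofs are below) =====
def Claim_equal_calc_unet_cropping_size : Prop := ∀ (size : Int) (n_layers : Int) (filter_size : Int) (pool_size : Int), Dom_calc_unet_cropping_size size n_layers filter_size pool_size → Spec_calc_unet_cropping_size size n_layers filter_size pool_size (calc_unet_cropping_size size n_layers filter_size pool_size)

-- ===== LEMMAS AND PROOFS =====

-- a fold whose step ignores the list element is an iterate of the step
theorem pv_foldl_ignore {α β : Type} (φ : α → α) (l : List β) (s : α) :
    l.foldl (fun a _ => φ a) s = φ^[l.length] s := by
  induction l generalizing s with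
  | nil => rfl
  | cons x xs ih => simp [Function.iterate_succ_apply, ih (φ s)]

-- pull an even subtrahend out of a floor halving
theorem pv_fdiv_sub_mul (x m : Int) :
    PySem.Int.floordiv (x - 2 * m) 2 = PySem.Int.floordiv x 2 - m := by
  rw [PySem.Int.floordiv_eq_ediv_of_pos (show (0:Int) < 2 by norm_num),
      PySem.Int.floordiv_eq_ediv_of_pos (show (0:Int) < 2 by norm_num)]
  have h := Int.add_mul_ediv_right x (-m) (c := 2) (by norm_num)
  have : x - 2 * m = x + (-m) * 2 := by ring
  rw [this, h]; ring

-- composing floor divisions: (x // 2) // p = x // (2*p) for p > 0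
theorem pv_fdiv_fdiv (x p : Int) (hp : 0 < p) :
    PySem.Int.floordiv (PySem.Int.floordiv x 2) p = PySem.Int.floordiv x (2 * p) := by
  rw [PySem.Int.floordiv_eq_ediv_of_pos (show (0:Int) < 2 by norm_num),
      PySem.Int.floordiv_eq_ediv_of_pos hp,
      PySem.Int.floordiv_eq_ediv_of_pos (show (0:Int) < 2 * p by positivity)]
  exact Int.ediv_ediv_of_nonneg (by norm_num)

-- the heart: k down-steps, the middle subtraction, and k up-steps compose to the closed form
theorem pv_iter_closed (c : Int) : ∀ (k : Nat) (s : Int),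
    (fun t => t * 2 - c)^[k] ((fun t => PySem.Int.floordiv (t - c) 2)^[k] s - c)
      = 2 ^ k * PySem.Int.floordiv (s - c * (2 ^ k - 1)) (2 ^ k) - c * (2 * 2 ^ k - 1) := by
  intro k
  induction k with
  | zero => intro s; simp
  | succ k ih =>
    intro s
    have hdown : (fun t => PySem.Int.floordiv (t - c) 2)^[k + 1] s
        = (fun t => PySem.Int.floordiv (t - c) 2)^[k] (PySem.Int.floordiv (s - c) 2) :=
      Function.iterate_succ_apply _ _ _
    have hup : ∀ t : Int, (fun t => t * 2 - c)^[k + 1] t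
        = ((fun t => t * 2 - c)^[k] t) * 2 - c := by
      intro t; rw [Function.iterate_succ_apply']
    rw [hdown, hup, ih]
    have hstep : PySem.Int.floordiv (PySem.Int.floordiv (s - c) 2 - c * (2 ^ k - 1)) (2 ^ k)
        = PySem.Int.floordiv (s - c * (2 ^ (k + 1) - 1)) (2 ^ (k + 1)) := by
      rw [← pv_fdiv_sub_mul (s - c) (c * (2 ^ k - 1)),
          pv_fdiv_fdiv _ _ (by positivity)]
      have e1 : s - c - 2 * (c * (2 ^ k - 1)) = s - c * (2 ^ (k + 1) - 1) := by ring
      have e2 : (2:Int) * 2 ^ k = 2 ^ (k + 1) := by ring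
      rw [e1, e2]
    rw [hstep]; ring

-- ===== VERDICT (by name: the statement is the Claim_ definition above) =====
theorem calc_unet_cropping_size_spec : Claim_equal_calc_unet_cropping_size := by
  intro size n_layers filter_size pool_size _
  unfold Spec_calc_unet_cropping_size calc_unet_cropping_size calc_unet_cropping_size_alt
  have hk : (max (n_layers - 1) 0).toNat = (n_layers - 1).toNat := by omega
  have hlen : (PySem.List.pyRange 0 (n_layers - 1) 1).length = (n_layers - 1).toNat := by
    rw [PySem.List.length_pyRange_one]; norm_num
  simp only [pv_foldl_ignore, hlen, hk]
  rw [pv_iter_closed (2 * (filter_size - 1)) (n_layers - 1).toNat size]
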